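-- pv_equiv track=rewrite | github.com/noicane/nexor-erp | core/musteri_yenileme_check.py | _esik_belirle
-- ===== SOURCE A (Python) =====
-- from typing import Optional
--
-- ESIKLER = [60, 30, 7, 1]
--
-- def _esik_belirle(kalan: int) -> Optional[int]:
--     """Verilen kalan gune gore EN UYGUN esigi don. Negatif kalan = -1 (gecmis)."""
--     if kalan is None:
--         return None
--     if kalan < 0:
--         return -1  # Gecmis
--     for esik in sorted(ESIKLER):  # 1, 7, 30, 60
--         if kalan <= esik:
--             return esik
--     return None  # Henuz uzak
-- ===== SOURCE B (Python) =====
-- from typing import Optional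
--
-- ESIKLER = [60, 30, 7, 1]
--
-- def _esik_belirle(kalan: int) -> Optional[int]:
--     """Kalan gune uyan esiklerin hepsini topla, en kucugunu don."""
--     if kalan is None:
--         return None
--     if kalan < 0:
--         return -1
--     candidates = [e for e in ESIKLER if kalan <= e]
--     return min(candidates) if candidates else None
-- ===== Notes on version B (the rewrite author's own statement) =====
-- stated objective: simpler
-- what changed: Replaces the sort-then-scan-with-early-return over a sorted copy of ESIKLER by a single filter of the qualifying thresholds followed by min, with no sorting and no early exit.
import Mathlib
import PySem

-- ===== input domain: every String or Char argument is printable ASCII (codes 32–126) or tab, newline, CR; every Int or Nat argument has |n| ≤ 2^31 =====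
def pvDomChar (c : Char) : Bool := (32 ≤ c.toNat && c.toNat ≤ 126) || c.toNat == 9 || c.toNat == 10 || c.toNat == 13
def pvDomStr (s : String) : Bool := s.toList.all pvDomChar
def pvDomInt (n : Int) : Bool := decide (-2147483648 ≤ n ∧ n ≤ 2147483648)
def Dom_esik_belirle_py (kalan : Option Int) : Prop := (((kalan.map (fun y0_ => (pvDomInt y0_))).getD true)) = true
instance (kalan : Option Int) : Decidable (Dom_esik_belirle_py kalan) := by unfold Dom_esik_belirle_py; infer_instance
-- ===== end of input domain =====

-- B replaces A's scan of a sorted copy with early return by filtering the qualifying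
-- thresholds and taking their min (objective: simpler decomposition, same cost).


-- ===== PORT A =====
-- constant from the module
def pvESIKLER : List Int := [60, 30, 7, 1]

-- 'for esik in sorted(ESIKLER): if kalan <= esik: return esik' / 'return None'
def pvALoop (k : Int) : List Int → Option Int
  | [] => none
  | e :: rest => if k ≤ e then some e else pvALoop k rest

def esik_belirle_py (kalan : Option Int) : Option Int :=
  match kalan with
  | none => none
  | some k =>
    if k < 0 then some (-1)
    else pvALoop k (PySem.List.sorted pvESIKLER (fun x => x) false)

-- ===== PORT B =====
def esik_belirle_py_alt (kalan : Option Int) : Option Int :=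
  match kalan with
  | none => none
  | some k =>
    if k < 0 then some (-1)
    else
      let candidates := pvESIKLER.filter (fun e => k ≤ e)
      if candidates ≠ [] then PySem.List.min? candidates (fun x => x) else none

-- ===== PRECONDITION & SPEC =====
def Spec_esik_belirle_py (kalan : Option Int) (out : Option Int) : Prop := out = esik_belirle_py_alt kalan
instance (kalan : Option Int) (out : Option Int) : Decidable (Spec_esik_belirle_py kalan out) := by unfold Spec_esik_belirle_py; infer_instance

-- ===== CLAIM (what is proved, stated in full; the proofs are below) =====
def Claim_equal_esik_belirle_py : Prop := ∀ (kalan : Option Int), Dom_esik_belirle_py kalan → Spec_esik_belirle_py kalan (esik_belirle_py kalan)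

-- ===== LEMMAS AND PROOFS =====
theorem pv_sorted_esikler : PySem.List.sorted pvESIKLER (fun x => x) false = [1, 7, 30, 60] := by decide


-- ===== VERDICT (by name: the statement is the Claim_ definition above) =====
theorem esik_belirle_py_spec : Claim_equal_esik_belirle_py := by
  intro kalan _
  unfold Spec_esik_belirle_py esik_belirle_py esik_belirle_py_alt
  match kalan with
  | none => rfl
  | some k =>
    by_cases h0 : k < 0
    · simp [h0]
    · simp only [h0, if_false, pv_sorted_esikler]
      by_cases h1 : k ≤ 1 <;> by_cases h7 : k ≤ 7 <;> by_cases h30 : k ≤ 30 <;>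
        by_cases h60 : k ≤ 60 <;> (try omega) <;>
        simp [pvALoop, pvESIKLER, List.filter, h1, h7, h30, h60] <;> decide
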